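-- pv_equiv track=rewrite | github.com/esteban2006/appWriteConnectInit | src/utils.py | is_key_valid
-- ===== SOURCE A (Python) =====
-- app_key = "standard_c8ed384c3b34a4e773445f193b369cf997fce6a27888f31c6d3fc88fe5f98dce43da0b70024e1a022faab44c0f0ff86e4367e4ced303dca8d00826d9a63379168c95a083bb3028c8da9f48c2192ee08e57356453271b1bf7b413288cba1aa53bf65edd1841326c52777b70db2152b32d113c0cfef76c90ac2c3860cd3c52d963"
--
-- def is_key_valid(key):
--     """Checks if a key is a valid substring of the original string, handling wraparound.
--
--     Args:
--         original_string: The original string.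
--         key: The key to check.
--         start_index: The starting index to check from.
--
--     Returns:
--         True if the key is valid, False otherwise.
--     """
--
--     if "_" not in key:
--         return False
--
--     original_string = app_key
--
--     key, start_index = key.split("_")
--     start_index = int(start_index)
--
--     # Handle wraparound
--     key_length = len(key)
--     key_chars = []
--     for i in range(key_length):
--         key_chars.append(original_string[(start_index + i) % len(original_string)])
--
--     return "".join(key_chars) == key
-- ===== SOURCE B (Python) =====
-- app_key = "standard_c8ed384c3b34a4e773445f193b369cf997fce6a27888f31c6d3fc88fe5f98dce43da0b70024e1a022faab44c0f0ff86e4367e4ced303dca8d00826d9a63379168c95a083bb3028c8da9f48c2192ee08e57356453271b1bf7b413288cba1aa53bf65edd1841326c52777b70db2152b32d113c0cfef76c90ac2c3860cd3c52d963"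
--
-- def is_key_valid(key):
--     if "_" not in key:
--         return False
--     key, start_index = key.split("_")
--     n = len(app_key)
--     s = int(start_index) % n
--     rot = app_key[s:] + app_key[:s]
--     full = rot * (len(key) // n + 1)
--     return full[:len(key)] == key
-- ===== Notes on version B (the rewrite author's own statement) =====
-- stated objective: alternative
-- what changed: Replaces A's per-character accumulation loop over indices (start+i) % len with string algebra: rotate app_key at start % len, repeat the rotation enough times, and compare the length-len(key) prefix slice.
-- outside the precondition, e.g. on is_key_valid('a_b_c'): A raises ValueError, B raises ValueError; on is_key_valid('a_x'): A raises ValueError, B raises ValueError; on is_key_valid('_'): A raises ValueError, B raises ValueError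
import Mathlib
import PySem

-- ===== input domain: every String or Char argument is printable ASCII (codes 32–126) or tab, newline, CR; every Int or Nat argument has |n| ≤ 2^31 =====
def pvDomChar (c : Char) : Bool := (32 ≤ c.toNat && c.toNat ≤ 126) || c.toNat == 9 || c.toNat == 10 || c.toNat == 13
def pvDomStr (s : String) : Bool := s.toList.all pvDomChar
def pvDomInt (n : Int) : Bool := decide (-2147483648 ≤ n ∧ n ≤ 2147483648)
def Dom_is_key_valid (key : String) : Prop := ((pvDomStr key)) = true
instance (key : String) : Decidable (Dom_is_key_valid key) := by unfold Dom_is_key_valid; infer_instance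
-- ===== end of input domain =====

-- B replaces A's per-character accumulation loop by rotate-repeat-slice string algebra
-- (rotation of app_key + repetition + prefix comparison); objective: alternative.

def appKeyChars : List Char := "standard_c8ed384c3b34a4e773445f193b369cf997fce6a27888f31c6d3fc88fe5f98dce43da0b70024e1a022faab44c0f0ff86e4367e4ced303dca8d00826d9a63379168c95a083bb3028c8da9f48c2192ee08e57356453271b1bf7b413288cba1aa53bf65edd1841326c52777b70db2152b32d113c0cfef76c90ac2c3860cd3c52d963".toList

-- ===== PORT A =====
def is_key_valid (key : String) : Bool :=
  if !(PySem.Str.isIn "_" key) then false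
  else
    match PySem.Chars.split? key.toList "_".toList with
    | some [k, si] =>
      match PySem.Int.ofChars? si with
      | some start_index =>
        let original_string := appKeyChars
        let key_length := k.length
        let key_chars :=
          (PySem.List.pyRange 0 (key_length : Int) 1).foldl
            (fun acc i =>
              acc ++ [PySem.List.pyGetD original_string
                        (PySem.Int.mod (start_index + i) (original_string.length : Int)) ' '])
            ([] : List Char)
        key_chars == k
      | none => false     -- int(start_index) raises ValueError: outside Pre_
    | _ => false          -- unpacking k, si raises ValueError: outside Pre_

-- ===== PORT B =====
def appKeyCharsB : List Char := "standard_c8ed384c3b34a4e773445f193b369cf997fce6a27888f31c6d3fc88fe5f98dce43da0b70024e1a022faab44c0f0ff86e4367e4ced303dca8d00826d9a63379168c95a083bb3028c8da9f48c2192ee08e57356453271b1bf7b413288cba1aa53bf65edd1841326c52777b70db2152b32d113c0cfef76c90ac2c3860cd3c52d963".toList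

def is_key_valid_alt (key : String) : Bool :=
  if !(PySem.Str.isIn "_" key) then false
  else
    let parts := (PySem.Chars.split? key.toList "_".toList).getD []
    if parts.length == 2 then   -- 'k, si = key.split("_")'; any other shape raises: outside Pre_
      let k := parts.headD []
      let si := parts.getLast?.getD []
      (PySem.Int.ofChars? si).elim false (fun st =>   -- none = int() raises: outside Pre_
        let n := appKeyCharsB.length
        let s := (PySem.Int.mod st (n : Int)).toNat
        let rot := PySem.List.slice appKeyCharsB (some (s : Int)) none
                   ++ PySem.List.slice appKeyCharsB none (some (s : Int))
        let full := (List.replicate (k.length / n + 1) rot).flatten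
        PySem.List.slice full none (some (k.length : Int)) == k)
    else false

-- ===== PRECONDITION & SPEC =====
-- Pre_ excludes exactly the inputs where A raises ValueError: keys whose split on "_"
-- yields more than two pieces, or whose piece after "_" does not parse as an int.
def Pre_is_key_valid (key : String) : Prop :=
  (let parts := (PySem.Chars.split? key.toList "_".toList).getD []
   parts.length == 1
     || (parts.length == 2 && (PySem.Int.ofChars? (parts.getLast?.getD [])).isSome)) = true
instance (key : String) : Decidable (Pre_is_key_valid key) := by unfold Pre_is_key_valid; infer_instance
def pvWitness_is_key_valid : String := "abc_5"

def Spec_is_key_valid (key : String) (out : Bool) : Prop := out = is_key_valid_alt key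
instance (key : String) (out : Bool) : Decidable (Spec_is_key_valid key out) := by unfold Spec_is_key_valid; infer_instance

-- ===== CLAIM (what is proved, stated in full; the proofs are below) =====
def Claim_equal_is_key_valid : Prop := ∀ (key : String), Dom_is_key_valid key → Pre_is_key_valid key → Spec_is_key_valid key (is_key_valid key)

-- ===== LEMMAS AND PROOFS =====

theorem appKeyCharsB_eq : appKeyCharsB = appKeyChars := rfl

theorem lt_div_succ_mul (L n : Nat) (h : 0 < n) : L < (L / n + 1) * n := by
  rw [Nat.add_mul, one_mul, Nat.mul_comm]
  have h1 := Nat.div_add_mod L n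
  have h2 := Nat.mod_lt L h
  omega

-- every index of a flattening of m copies of rot reads rot cyclically
theorem getElem_flatten_replicate {α : Type} (rot : List α) (m i : Nat)
    (h : i < ((List.replicate m rot).flatten).length) :
    ((List.replicate m rot).flatten)[i] = rot[i % rot.length]'(by
      rcases Nat.eq_zero_or_pos rot.length with h0 | h0
      · simp [List.length_flatten, List.map_replicate, h0] at h
      · exact Nat.mod_lt _ h0) := by
  induction m generalizing i with
  | zero => simp at h
  | succ m ih =>
    have e : (List.replicate (m + 1) rot).flatten = rot ++ (List.replicate m rot).flatten := by
      rw [List.replicate_succ, List.flatten_cons]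
    rw [List.getElem_of_eq e]
    by_cases hi : i < rot.length
    · rw [List.getElem_append_left hi]
      simp [Nat.mod_eq_of_lt hi]
    · have hlen : rot.length + (i - rot.length) = i := by omega
      rw [List.getElem_append_right (by omega)]
      have hflat : ∀ m' : Nat, ((List.replicate m' rot).flatten).length = m' * rot.length := by
        intro m'
        simp [List.length_flatten, List.map_replicate, smul_eq_mul]
      have hsucc : (m + 1) * rot.length = m * rot.length + rot.length := Nat.succ_mul m rot.length
      have hh := h
      rw [hflat] at hh
      have := ih (i - rot.length) (by rw [hflat]; omega)
      rw [this]
      congr 1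
      exact (Nat.mod_eq_sub_mod (by omega)).symm

-- the slice of the repeated rotation is exactly the wraparound window A's loop collects
theorem take_flatten_rot {α : Type} [Inhabited α] (cs : List α) (s L : Nat)
    (hs : s < cs.length) :
    ((List.replicate (L / cs.length + 1) (cs.drop s ++ cs.take s)).flatten).take L
      = (List.range L).map (fun i => cs[(s + i) % cs.length]'(Nat.mod_lt _ (by omega))) := by
  set n := cs.length with hn
  have hn0 : 0 < n := by omega
  apply List.ext_getElem
  · have hLlt : L < (L / n + 1) * n := lt_div_succ_mul L n hn0
    simp only [List.length_take, List.length_map, List.length_range,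
      List.length_flatten, List.map_replicate, List.sum_replicate, smul_eq_mul,
      List.length_append, List.length_drop, List.length_take, hn.symm]
    have hmin : n - s + min s n = n := by omega
    rw [hmin]
    omega
  · intro i h1 h2
    simp only [List.length_take] at h1
    rw [List.getElem_take, List.getElem_map, List.getElem_range]
    rw [getElem_flatten_replicate]
    have hrotlen : (cs.drop s ++ cs.take s).length = n := by
      simp [hn.symm]; omega
    have hjn : i % (cs.drop s ++ cs.take s).length = i % n := by rw [hrotlen]
    set j := i % n with hj
    have hjlt : j < n := Nat.mod_lt _ hn0
    have hsij : (s + i) % n = (s + j) % n := by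
      conv_lhs => rw [← Nat.div_add_mod i n]
      rw [← hj, ← Nat.add_assoc, Nat.add_comm s (n * (i / n)), Nat.add_assoc,
        Nat.mul_add_mod_self_left]
    by_cases hc : j < n - s
    · have : (cs.drop s ++ cs.take s)[i % (cs.drop s ++ cs.take s).length]'(by omega)
          = cs[s + j]'(by omega) := by
        simp only [hjn]
        rw [List.getElem_append_left (by simp [hn.symm]; omega), List.getElem_drop]
      rw [this]
      congr 1
      rw [hsij, Nat.mod_eq_of_lt (by omega)]
    · have : (cs.drop s ++ cs.take s)[i % (cs.drop s ++ cs.take s).length]'(by omega)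
          = cs[j - (n - s)]'(by omega) := by
        simp only [hjn]
        rw [List.getElem_append_right (by simp [hn.symm]; omega), List.getElem_take]
        congr 1
        simp [hn.symm]
      rw [this]
      congr 1
      rw [hsij, Nat.mod_eq_sub_mod (by omega), Nat.mod_eq_of_lt (by omega)]
      omega

set_option maxRecDepth 4096 in
theorem appKeyChars_length : appKeyChars.length = 265 := by decide

-- A's loop body over the range equals B's rotated window, character for character
theorem loop_eq_window (st : Int) (k : List Char) :
    ((PySem.List.pyRange 0 (k.length : Int) 1).foldl
        (fun acc i =>
          acc ++ [PySem.List.pyGetD appKeyChars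
                    (PySem.Int.mod (st + i) (appKeyChars.length : Int)) ' '])
        ([] : List Char))
    = PySem.List.slice
        ((List.replicate (k.length / appKeyChars.length + 1)
            (PySem.List.slice appKeyChars (some ((PySem.Int.mod st (appKeyChars.length : Int)).toNat : Int)) none
             ++ PySem.List.slice appKeyChars none (some ((PySem.Int.mod st (appKeyChars.length : Int)).toNat : Int)))).flatten)
        none (some (k.length : Int)) := by
  have hn : (0 : Int) < (appKeyChars.length : Int) := by rw [appKeyChars_length]; decide
  have hmod := PySem.Int.mod_nonneg st hn
  have hmlt := PySem.Int.mod_lt st hn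
  set s : Nat := (PySem.Int.mod st (appKeyChars.length : Int)).toNat with hsdef
  have hs : s < appKeyChars.length := by omega
  rw [PySem.List.slice_from_natCast, PySem.List.slice_to_natCast, PySem.List.slice_to_natCast,
    PySem.List.foldl_append_singleton_eq_map, take_flatten_rot appKeyChars s k.length hs,
    PySem.List.pyRange_one]
  simp only [Int.sub_zero, Int.toNat_natCast, List.map_map]
  apply List.map_congr_left
  intro i _
  simp only [Function.comp]
  have h1 : PySem.Int.mod (st + (0 + (i : Int))) (appKeyChars.length : Int)
      = (((s + i) % appKeyChars.length : Nat) : Int) := by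
    rw [PySem.Int.mod_eq_emod_of_pos hn]
    have hst : st % (appKeyChars.length : Int) = (s : Int) := by
      rw [← PySem.Int.mod_eq_emod_of_pos hn]; omega
    have h265 : appKeyChars.length = 265 := appKeyChars_length
    rw [h265] at hst ⊢
    push_cast
    omega
  rw [h1, PySem.List.pyGetD_natCast]
  rw [List.getD_eq_getElem _ _ (Nat.mod_lt _ (by omega))]

-- ===== VERDICT (by name: the statement is the Claim_ definition above) =====
set_option maxRecDepth 8192 in
theorem is_key_valid_spec : Claim_equal_is_key_valid := by
  intro key _ _
  unfold Spec_is_key_valid is_key_valid is_key_valid_alt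
  by_cases hin : PySem.Str.isIn "_" key
  · simp only [hin, Bool.not_true, Bool.false_eq_true, if_false]
    cases hsp : PySem.Chars.split? key.toList "_".toList with
    | none => rfl
    | some parts =>
      match parts with
      | [] => rfl
      | [_] => rfl
      | [k, si] =>
        have hlast : ([k, si] : List (List Char)).getLast? = some si := rfl
        dsimp only [Option.getD_some, List.headD_cons]
        rw [hlast]
        dsimp only [Option.getD_some]
        cases hof : PySem.Int.ofChars? si with
        | none => simp
        | some st =>
          dsimp only [Option.elim]
          rw [appKeyCharsB_eq, loop_eq_window st k]
          rfl
      | _ :: _ :: _ :: _ => rfl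
  · simp only [Bool.not_eq_true] at hin
    rw [hin]
    rfl
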